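-- pv_equiv track=rewrite | github.com/hirodesu85/atcoder | AtCoder-Beginners-Selection/otoshidama.py | is_valid_combination
-- ===== SOURCE A (Python) =====
-- def is_valid_combination(n, y):
--     # 10000円札の枚数を全探索
--     for i in range(n + 1):
--         # 5000円札の枚数を全探索
--         for j in range(n - i + 1):
--             # 1000円札の枚数を計算
--             k = n - i - j
--
--             # 合計金額を計算
--             total = 10000 * i + 5000 * j + 1000 * k
--
--             # 合計金額がy円であれば、組み合わせを出力
--             if total == y:
--                 return i, j, k
--
--     # 見つからなかった場合は、-1を返す
--     return -1, -1, -1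
-- ===== SOURCE B (Python) =====
-- def is_valid_combination(n, y):
--     # For each count i of 10000-yen bills, solve 10000*i + 5000*j + 1000*(n-i-j) = y
--     # algebraically: 4000*j = y - 1000*n - 9000*i, so one divmod instead of an inner loop.
--     for i in range(n + 1):
--         j, r = divmod(y - 1000 * n - 9000 * i, 4000)
--         if r == 0 and 0 <= j <= n - i:
--             return i, j, n - i - j
--     return -1, -1, -1
-- ===== Notes on version B (the rewrite author's own statement) =====
-- stated objective: faster
-- what changed: Replaces A's brute-force inner loop over the 5000-yen count j with an algebraic solve: one divmod per i with a divisibility and range check, keeping only the outer loop over i.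
import Mathlib
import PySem

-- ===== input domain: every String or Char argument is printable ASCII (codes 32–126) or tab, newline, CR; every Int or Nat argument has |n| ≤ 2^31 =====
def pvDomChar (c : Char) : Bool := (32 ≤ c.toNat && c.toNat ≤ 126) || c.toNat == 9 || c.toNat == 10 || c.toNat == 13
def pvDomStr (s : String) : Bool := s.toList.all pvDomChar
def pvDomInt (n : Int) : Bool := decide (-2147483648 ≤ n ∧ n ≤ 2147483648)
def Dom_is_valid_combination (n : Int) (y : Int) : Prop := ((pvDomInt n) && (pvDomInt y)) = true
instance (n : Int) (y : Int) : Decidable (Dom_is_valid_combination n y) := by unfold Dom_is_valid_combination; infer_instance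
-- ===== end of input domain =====

-- B replaces A's inner brute-force loop over j with one divmod (algebraic solve); objective: faster (asymptotic, O(n^2) → O(n)).

-- ===== PORT A =====
-- inner loop: 'for j in range(n - i + 1)', fuel = remaining iterations, j = current value
def pvAInner (n y i : Int) : Nat → Int → Option (List Int)
  | 0, _ => none
  | t + 1, j =>
    let k := n - i - j
    let total := 10000 * i + 5000 * j + 1000 * k
    if total = y then some [i, j, k] else pvAInner n y i t (j + 1)

-- outer loop: 'for i in range(n + 1)'
def pvAOuter (n y : Int) : Nat → Int → List Int
  | 0, _ => [-1, -1, -1]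
  | t + 1, i =>
    match pvAInner n y i (n - i + 1).toNat 0 with
    | some r => r
    | none => pvAOuter n y t (i + 1)

def is_valid_combination (n : Int) (y : Int) : List Int :=
  pvAOuter n y (n + 1).toNat 0

-- ===== PORT B =====
-- single loop over i; j solved by divmod(y - 1000*n - 9000*i, 4000)
def pvBLoop (n y : Int) : Nat → Int → List Int
  | 0, _ => [-1, -1, -1]
  | t + 1, i =>
    let j := PySem.Int.floordiv (y - 1000 * n - 9000 * i) 4000
    let r := PySem.Int.mod (y - 1000 * n - 9000 * i) 4000
    if r = 0 ∧ 0 ≤ j ∧ j ≤ n - i then [i, j, n - i - j] else pvBLoop n y t (i + 1)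

def is_valid_combination_alt (n : Int) (y : Int) : List Int :=
  pvBLoop n y (n + 1).toNat 0

-- ===== PRECONDITION & SPEC =====
def Spec_is_valid_combination (n : Int) (y : Int) (out : List Int) : Prop := out = is_valid_combination_alt n y
instance (n : Int) (y : Int) (out : List Int) : Decidable (Spec_is_valid_combination n y out) := by unfold Spec_is_valid_combination; infer_instance

-- ===== CLAIM (what is proved, stated in full; the proofs are below) =====
def Claim_equal_is_valid_combination : Prop := ∀ (n : Int) (y : Int), Dom_is_valid_combination n y → Spec_is_valid_combination n y (is_valid_combination n y)

-- ===== LEMMAS AND PROOFS =====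

-- the inner-loop test is equivalent to the algebraic divisibility/quotient condition
theorem pv_total_iff (n y i j : Int) :
    (10000 * i + 5000 * j + 1000 * (n - i - j) = y) ↔
    (PySem.Int.mod (y - 1000 * n - 9000 * i) 4000 = 0 ∧
     PySem.Int.floordiv (y - 1000 * n - 9000 * i) 4000 = j) := by
  rw [PySem.Int.mod_eq_emod_of_pos (by norm_num), PySem.Int.floordiv_eq_ediv_of_pos (by norm_num)]
  omega

-- characterisation of A's inner loop
theorem pvAInner_eq (n y i : Int) (cnt : Nat) (j : Int) :
    pvAInner n y i cnt j =
      (if PySem.Int.mod (y - 1000 * n - 9000 * i) 4000 = 0 ∧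
          j ≤ PySem.Int.floordiv (y - 1000 * n - 9000 * i) 4000 ∧
          PySem.Int.floordiv (y - 1000 * n - 9000 * i) 4000 < j + cnt
       then some [i, PySem.Int.floordiv (y - 1000 * n - 9000 * i) 4000,
                  n - i - PySem.Int.floordiv (y - 1000 * n - 9000 * i) 4000]
       else none) := by
  induction cnt generalizing j with
  | zero => simp [pvAInner]
  | succ t ih =>
    rw [pvAInner]
    push_cast
    by_cases h : 10000 * i + 5000 * j + 1000 * (n - i - j) = y
    · obtain ⟨hm, hq⟩ := (pv_total_iff n y i j).mp h
      rw [if_pos h, if_pos ⟨hm, by omega, by omega⟩, hq]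
    · rw [if_neg h, ih]
      have h' := (not_iff_not.mpr (pv_total_iff n y i j)).mp h
      by_cases hm : PySem.Int.mod (y - 1000 * n - 9000 * i) 4000 = 0
      · have hne : PySem.Int.floordiv (y - 1000 * n - 9000 * i) 4000 ≠ j := fun hq => h' ⟨hm, hq⟩
        by_cases h1 : j + 1 ≤ PySem.Int.floordiv (y - 1000 * n - 9000 * i) 4000 ∧
            PySem.Int.floordiv (y - 1000 * n - 9000 * i) 4000 < j + 1 + (t : Int)
        · rw [if_pos ⟨hm, h1.1, h1.2⟩, if_pos ⟨hm, by omega, by omega⟩]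
        · have hA : ¬ (PySem.Int.mod (y - 1000 * n - 9000 * i) 4000 = 0 ∧
              j + 1 ≤ PySem.Int.floordiv (y - 1000 * n - 9000 * i) 4000 ∧
              PySem.Int.floordiv (y - 1000 * n - 9000 * i) 4000 < j + 1 + (t : Int)) :=
            fun hh => h1 ⟨hh.2.1, hh.2.2⟩
          have hB : ¬ (PySem.Int.mod (y - 1000 * n - 9000 * i) 4000 = 0 ∧
              j ≤ PySem.Int.floordiv (y - 1000 * n - 9000 * i) 4000 ∧
              PySem.Int.floordiv (y - 1000 * n - 9000 * i) 4000 < j + ((t : Int) + 1)) := by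
            rintro ⟨-, h2, h3⟩; exact h1 ⟨by omega, by omega⟩
          rw [if_neg hA, if_neg hB]
      · rw [if_neg (fun hh => hm hh.1), if_neg (fun hh => hm hh.1)]

-- the two loops agree step by step
theorem pvLoops_eq (n y : Int) (cnt : Nat) (i : Int) :
    pvAOuter n y cnt i = pvBLoop n y cnt i := by
  induction cnt generalizing i with
  | zero => rfl
  | succ t ih =>
    rw [pvAOuter, pvBLoop, pvAInner_eq]
    by_cases hc : PySem.Int.mod (y - 1000 * n - 9000 * i) 4000 = 0 ∧
        0 ≤ PySem.Int.floordiv (y - 1000 * n - 9000 * i) 4000 ∧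
        PySem.Int.floordiv (y - 1000 * n - 9000 * i) 4000 ≤ n - i
    · rw [if_pos ⟨hc.1, by omega, by omega⟩, if_pos hc]
    · rw [if_neg (fun h => hc ⟨h.1, by omega, by omega⟩), if_neg hc]
      exact ih (i + 1)

-- ===== VERDICT (by name: the statement is the Claim_ definition above) =====
theorem is_valid_combination_spec : Claim_equal_is_valid_combination := by
  intro n y _
  unfold Spec_is_valid_combination is_valid_combination is_valid_combination_alt
  exact pvLoops_eq n y _ 0
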